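-- pv_equiv track=rewrite | github.com/Valentino1994/dayAlgorithm | onedayAlgorithm/2022/Test/221126_Kakao_mobility/t2.py | solution
-- ===== SOURCE A (Python) =====
-- def solution(id_list, k):
--     answer = 0
--     coupon_dict = dict()
--
--     for today, ids in enumerate(id_list):
--         users = ids.split(" ")
--         for user in users:
--             if user in coupon_dict:
--                 if today not in coupon_dict[user] and len(coupon_dict[user]) < k:
--                     coupon_dict[user].append(today)
--             else:
--                 coupon_dict[user] = [today]
--
--     for value in coupon_dict.values():
--         answer += len(value)
--
--     return answer
-- ===== SOURCE B (Python) =====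
-- def solution(id_list, k):
--     lines = [ids.split(" ") for ids in id_list]
--     users = dict.fromkeys(u for line in lines for u in line)
--     return sum(min(sum(u in line for line in lines), k) for u in users)
-- ===== Notes on version B (the rewrite author's own statement) =====
-- stated objective: simpler
-- what changed: B replaces A's incremental dict of capped per-user day-lists (with a membership-and-length guard in the inner loop) by a staged computation: split all lines once, dedupe the users with dict.fromkeys, and for each user count the lines containing it, capped with min(count, k); Pre_ excludes negative caps k < 0, a domain no caller uses, where A still grants every user its first day while B's min yields a negative total.
-- intended difference: On k = 0 with a nonempty id_list, A returns the number of distinct users (its else-branch records each user's first day, bypassing the cap) while B returns 0, the intended value for a cap of zero coupon days. — e.g. on solution(["a"], 0): A returns 1, B returns 0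
-- outside the precondition, e.g. on solution(['a'], -1): A returns 1, B returns -1
import Mathlib
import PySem

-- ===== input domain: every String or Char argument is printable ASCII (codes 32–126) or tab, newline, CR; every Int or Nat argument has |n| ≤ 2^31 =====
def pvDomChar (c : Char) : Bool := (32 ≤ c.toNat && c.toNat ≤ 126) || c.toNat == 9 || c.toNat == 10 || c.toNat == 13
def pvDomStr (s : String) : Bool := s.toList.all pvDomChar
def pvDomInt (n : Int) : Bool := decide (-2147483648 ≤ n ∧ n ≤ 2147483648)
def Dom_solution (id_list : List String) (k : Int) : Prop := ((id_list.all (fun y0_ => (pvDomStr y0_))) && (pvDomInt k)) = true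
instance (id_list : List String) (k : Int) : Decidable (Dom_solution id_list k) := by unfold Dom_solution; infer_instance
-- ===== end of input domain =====

-- B drops A's incremental dict of capped day-lists: it dedupes the users once (dict.fromkeys)
-- and, per user, counts the lines that contain the user, capped with min(count, k) (objective: simpler).

-- s.split(" "): the separator is the nonempty literal " ", so PySem.Str.split? is always some
def pySplitSpace (s : String) : List String := (PySem.Str.split? s " ").getD []

-- ===== PORT A =====
-- one (today, user) step of A's inner loop body
def solutionStepA (k : Int) (d : PySem.Dict String (List Int)) (today : Int) (user : String) :
    PySem.Dict String (List Int) :=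
  if d.contains user then
    if today ∉ d.getD user [] ∧ ((d.getD user []).length : Int) < k then
      d.insert user (d.getD user [] ++ [today])   -- coupon_dict[user].append(today)
    else d
  else d.insert user [today]

def solution (id_list : List String) (k : Int) : Int :=
  ((PySem.List.enumerate id_list 0).foldl
      (fun d p => (pySplitSpace p.2).foldl (fun d user => solutionStepA k d p.1 user) d)
      PySem.Dict.empty).values.foldl
    (fun answer value => answer + (value.length : Int)) 0

-- ===== PORT B =====
def solution_alt (id_list : List String) (k : Int) : Int :=
  let lines := id_list.map pySplitSpace
  let users := PySem.Set.ofList lines.flatten   -- dict.fromkeys: first occurrences, in order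
  (users.map (fun u => min ((lines.countP (fun line => decide (u ∈ line)) : Int)) k)).sum

-- ===== PRECONDITION & SPEC =====
-- Pre_ excludes negative caps k < 0: the coupon cap is a count, no caller specifies a negative
-- one, and there A's value (every user still gets its first day) and B's (a negative total) are
-- both artefacts nobody would ask for.
def Pre_solution (id_list : List String) (k : Int) : Prop := 0 ≤ k
instance (id_list : List String) (k : Int) : Decidable (Pre_solution id_list k) := by unfold Pre_solution; infer_instance
def pvWitness_solution : List String × Int := (["a b", "a"], 2)

-- On k = 0 with a nonempty id_list A returns the number of distinct users (its else-branch
-- records each user's first day, bypassing the cap) while B returns 0, the intended value for a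
-- cap of zero coupon days.
def D_solution (id_list : List String) (k : Int) : Prop := k = 0 ∧ id_list ≠ []
instance (id_list : List String) (k : Int) : Decidable (D_solution id_list k) := by unfold D_solution; infer_instance

def Spec_solution (id_list : List String) (k : Int) (out : Int) : Prop := ¬ D_solution id_list k → out = solution_alt id_list k
instance (id_list : List String) (k : Int) (out : Int) : Decidable (Spec_solution id_list k out) := by unfold Spec_solution; infer_instance

def pvDiffWitness_solution : List String × Int := (["a"], 0)
def pvDiffWitnessOut_solution : Int × Int := (1, 0)

-- ===== CLAIM (what is proved, stated in full; the proofs are below) =====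
def Claim_unchanged_solution : Prop := ∀ (id_list : List String) (k : Int), Dom_solution id_list k → Pre_solution id_list k → Spec_solution id_list k (solution id_list k)
def Claim_changed_solution : Prop := Dom_solution (pvDiffWitness_solution.1) (pvDiffWitness_solution.2) ∧ Pre_solution (pvDiffWitness_solution.1) (pvDiffWitness_solution.2) ∧ D_solution (pvDiffWitness_solution.1) (pvDiffWitness_solution.2) ∧ solution (pvDiffWitness_solution.1) (pvDiffWitness_solution.2) = pvDiffWitnessOut_solution.1 ∧ solution_alt (pvDiffWitness_solution.1) (pvDiffWitness_solution.2) = pvDiffWitnessOut_solution.2 ∧ pvDiffWitnessOut_solution.1 ≠ pvDiffWitnessOut_solution.2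
def Claim_exact_solution : Prop := ∀ (id_list : List String) (k : Int), Dom_solution id_list k → Pre_solution id_list k → D_solution id_list k → solution id_list k ≠ solution_alt id_list k

-- ===== LEMMAS AND PROOFS =====

-- ghost structure for the proof only: A's dict, with the cap stripped, is the dict of full
-- distinct-day sets; it mediates between A's fold and B's per-user counts.
def ghostStep (d : PySem.Dict String (PySem.Set Int)) (today : Int) (user : String) :
    PySem.Dict String (PySem.Set Int) :=
  d.modify user [] (fun s => PySem.Set.add s today)

def ghostFold (L : List (Int × String)) (d : PySem.Dict String (PySem.Set Int)) :
    PySem.Dict String (PySem.Set Int) :=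
  L.foldl (fun d p => (pySplitSpace p.2).foldl (fun d user => ghostStep d p.1 user) d) d

-- the cap A's branch enforces: k distinct days, but the first appearance always counts
def pvCap (k : Int) : Nat := (max k 1).toNat

lemma pvCap_pos (k : Int) : 1 ≤ pvCap k := by unfold pvCap; omega

lemma pvCap_cast (k : Int) : (pvCap k : Int) = max k 1 := by unfold pvCap; omega

lemma pvCap_ge (k : Int) : k ≤ (pvCap k : Int) := by unfold pvCap; omega

-- simulation relation: same keys in order, and A's capped list is the ghost's day-set truncated at the cap
def pvInv (k : Int) (dA : PySem.Dict String (List Int)) (dB : PySem.Dict String (PySem.Set Int)) : Prop :=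
  dA.keys = dB.keys ∧ dB.keys.Nodup ∧
  (∀ u : String, dB.contains u = true → dB.getD u [] ≠ []) ∧
  (∀ u : String, dA.getD u [] = (dB.getD u []).take (pvCap k))

lemma pvSetAdd_ne_nil (s : PySem.Set Int) (t : Int) : PySem.Set.add s t ≠ [] := by
  unfold PySem.Set.add
  split
  · rename_i hc
    intro h
    rw [h] at hc
    simp [PySem.Set.contains] at hc
  · simp

lemma foldl_rel {α σ τ : Type} (R : σ → τ → Prop) (f : σ → α → σ) (g : τ → α → τ)
    (h : ∀ s t a, R s t → R (f s a) (g t a)) :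
    ∀ (l : List α) (s : σ) (t : τ), R s t → R (l.foldl f s) (l.foldl g t) := by
  intro l
  induction l with
  | nil => intro s t hst; simpa using hst
  | cons x xs ih => intro s t hst; exact ih _ _ (h s t x hst)

-- the heart of the A-side: the ghost's unconditional Set.add, truncated at the cap, is exactly A's guarded append
lemma pvTake_add (k today : Int) (s : PySem.Set Int) (hslen : 1 ≤ s.length) :
    (PySem.Set.add s today).take (pvCap k) =
      (if today ∉ s.take (pvCap k) ∧ ((s.take (pvCap k)).length : Int) < k
        then s.take (pvCap k) ++ [today] else s.take (pvCap k)) := by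
  by_cases hmem : today ∈ s
  · have hadd : PySem.Set.add s today = s := by
      simp [PySem.Set.add, PySem.Set.contains, hmem]
    rw [hadd, if_neg]
    rintro ⟨h1, h2⟩
    by_cases hle : s.length ≤ pvCap k
    · exact h1 (by rwa [List.take_of_length_le hle])
    · have hlen : (s.take (pvCap k)).length = pvCap k := by
        rw [List.length_take]; omega
      rw [hlen] at h2
      have := pvCap_ge k; omega
  · have hadd : PySem.Set.add s today = s ++ [today] := by
      simp [PySem.Set.add, PySem.Set.contains, hmem]
    rw [hadd]
    by_cases hlt : s.length < pvCap k
    · have hfull : s.take (pvCap k) = s := List.take_of_length_le (by omega)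
      rw [if_pos]
      · rw [hfull, List.take_of_length_le (by simp; omega)]
      · refine ⟨by rwa [hfull], ?_⟩
        rw [hfull]
        have := pvCap_cast k; omega
    · have hncond : ¬ (today ∉ s.take (pvCap k) ∧ ((s.take (pvCap k)).length : Int) < k) := by
        rintro ⟨_, h2⟩
        have hlen : (s.take (pvCap k)).length = pvCap k := by
          rw [List.length_take]; omega
        rw [hlen] at h2
        have := pvCap_ge k; omega
      rw [if_neg hncond, List.take_append_of_le_length (by omega)]

lemma pvInv_step (k today : Int) (user : String)
    (dA : PySem.Dict String (List Int)) (dB : PySem.Dict String (PySem.Set Int))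
    (h : pvInv k dA dB) : pvInv k (solutionStepA k dA today user) (ghostStep dB today user) := by
  obtain ⟨hk, hnd, hne, hval⟩ := h
  have hcont : dA.contains user = dB.contains user := by
    rw [PySem.Dict.contains_eq_decide_mem_keys, PySem.Dict.contains_eq_decide_mem_keys, hk]
  have hgetB : ∀ u' : String, (ghostStep dB today user).getD u' [] =
      if u' = user then PySem.Set.add (dB.getD user []) today else dB.getD u' [] := by
    intro u'; unfold ghostStep; rw [PySem.Dict.getD_modify]
  have hcontB : ∀ u' : String, (ghostStep dB today user).contains u' =
      (u' == user || dB.contains u') := by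
    intro u'; unfold ghostStep; rw [PySem.Dict.contains_modify]
  by_cases hc : dB.contains user = true
  · -- user already present in both dicts
    have hcA : dA.contains user = true := by rw [hcont]; exact hc
    have hkB : (ghostStep dB today user).keys = dB.keys := by
      unfold ghostStep
      rw [PySem.Dict.keys_modify, PySem.Dict.keys_insert_of_contains _ _ hc]
    have hkA : (solutionStepA k dA today user).keys = dA.keys := by
      unfold solutionStepA
      rw [hcA]
      simp only [if_true]
      split
      · rw [PySem.Dict.keys_insert_of_contains _ _ hcA]
      · rfl
    refine ⟨by rw [hkA, hkB, hk], by rwa [hkB], ?_, ?_⟩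
    · intro u' hcu
      rw [hgetB u']
      by_cases he : u' = user
      · rw [if_pos he]; exact pvSetAdd_ne_nil _ _
      · rw [if_neg he]
        rw [hcontB u'] at hcu
        simp [he] at hcu
        exact hne u' hcu
    · intro u'
      by_cases he : u' = user
      · subst he
        rw [hgetB, if_pos rfl, pvTake_add k today _ ?_, ← hval u']
        · unfold solutionStepA
          rw [hcA]
          simp only [if_true]
          split
          · rw [PySem.Dict.getD_insert_self]
          · rfl
        · have := hne u' hc
          cases hh : dB.getD u' [] with
          | nil => exact absurd hh this
          | cons a t => simp
      · rw [hgetB, if_neg he]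
        unfold solutionStepA
        rw [hcA]
        simp only [if_true]
        split
        · rw [PySem.Dict.getD_insert_of_ne _ _ _ he]; exact hval u'
        · exact hval u'
  · -- fresh user: A inserts [today]; the ghost's modify appends Set.add ∅ today = [today]
    have hc' : dB.contains user = false := by simpa using hc
    have hcA : dA.contains user = false := by rw [hcont]; exact hc'
    have hB0 : dB.getD user [] = [] := PySem.Dict.getD_of_not_contains _ _ hc'
    have hstepA : solutionStepA k dA today user = dA.insert user [today] := by
      unfold solutionStepA; rw [hcA]; simp
    have hkB : (ghostStep dB today user).keys = dB.keys ++ [user] := by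
      unfold ghostStep
      rw [PySem.Dict.keys_modify, PySem.Dict.keys_insert_of_not_contains _ _ hc']
    refine ⟨?_, ?_, ?_, ?_⟩
    · rw [hstepA, PySem.Dict.keys_insert_of_not_contains _ _ hcA, hkB, hk]
    · rw [hkB]
      refine List.Nodup.append hnd (List.nodup_singleton user) ?_
      intro a ha hb
      rw [List.mem_singleton] at hb
      subst hb
      have := (PySem.Dict.contains_iff_mem_keys _ _).2 ha
      rw [this] at hc'
      exact absurd hc' (by simp)
    · intro u' _
      rw [hgetB u']
      by_cases he : u' = user
      · rw [if_pos he]; exact pvSetAdd_ne_nil _ _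
      · rw [if_neg he]
        by_cases hcu : dB.contains u' = true
        · exact hne u' hcu
        · rw [PySem.Dict.getD_of_not_contains _ _ (by simpa using hcu)]
          rw [hcontB u'] at *
          simp_all
    · intro u'
      rw [hstepA, hgetB u']
      by_cases he : u' = user
      · subst he
        rw [if_pos rfl, hB0, PySem.Dict.getD_insert_self]
        have hadd : PySem.Set.add ([] : PySem.Set Int) today = [today] := by
          simp [PySem.Set.add, PySem.Set.contains]
        rw [hadd, List.take_of_length_le (by simpa using pvCap_pos k)]
      · rw [if_neg he, PySem.Dict.getD_insert_of_ne _ _ _ he]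
        exact hval u'

lemma pvInv_empty (k : Int) : pvInv k PySem.Dict.empty PySem.Dict.empty := by
  refine ⟨by simp [PySem.Dict.keys_empty], by simp [PySem.Dict.keys_empty], ?_, ?_⟩
  · intro u h
    rw [PySem.Dict.contains_empty] at h
    exact absurd h (by simp)
  · intro u
    simp [PySem.Dict.getD_empty]

-- A's answer via the ghost dict: sum of day-set lengths truncated at the cap
lemma pvA_eq_ghost (id_list : List String) (k : Int) :
    solution id_list k =
      (((ghostFold (PySem.List.enumerate id_list 0) PySem.Dict.empty).values.map
        (fun s => min (s.length : Int) (max k 1))).sum) := by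
  unfold solution ghostFold
  have hinv := foldl_rel (pvInv k)
    (fun d p => (pySplitSpace p.2).foldl (fun d user => solutionStepA k d p.1 user) d)
    (fun d p => (pySplitSpace p.2).foldl (fun d user => ghostStep d p.1 user) d)
    (fun dA dB p hp =>
      foldl_rel (pvInv k) (fun d user => solutionStepA k d p.1 user)
        (fun d user => ghostStep d p.1 user)
        (fun dA dB u h => pvInv_step k p.1 u dA dB h) _ dA dB hp)
    (PySem.List.enumerate id_list 0) PySem.Dict.empty PySem.Dict.empty (pvInv_empty k)
  obtain ⟨hk, hnd, _, hval⟩ := hinv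
  rw [PySem.List.foldl_add (g := fun v : List Int => (v.length : Int)),
    PySem.Dict.values_eq_map_keys _ (hk ▸ hnd) [],
    PySem.Dict.values_eq_map_keys _ hnd [], hk, List.map_map, List.map_map]
  rw [zero_add]
  refine congrArg List.sum (List.map_congr_left ?_)
  intro u _
  simp only [Function.comp]
  rw [hval u, List.length_take]
  push_cast
  rw [pvCap_cast, min_comm]

-- ghost keys: the users, deduped in first-occurrence order
lemma pvKeys_ghostStep (d : PySem.Dict String (PySem.Set Int)) (t : Int) (u : String) :
    (ghostStep d t u).keys = PySem.Set.add d.keys u := by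
  unfold ghostStep
  rw [PySem.Dict.keys_modify]
  by_cases hm : u ∈ d.keys
  · have hc : d.contains u = true := by
      rw [PySem.Dict.contains_eq_decide_mem_keys]; simpa
    rw [PySem.Dict.keys_insert_of_contains _ _ hc]
    simp [PySem.Set.add, PySem.Set.contains, hm]
  · have hc : d.contains u = false := by
      rw [PySem.Dict.contains_eq_decide_mem_keys]; simpa
    rw [PySem.Dict.keys_insert_of_not_contains _ _ hc]
    simp [PySem.Set.add, PySem.Set.contains, hm]

lemma pvKeys_inner (ws : List String) (t : Int) :
    ∀ d : PySem.Dict String (PySem.Set Int),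
      (ws.foldl (fun d u => ghostStep d t u) d).keys = ws.foldl PySem.Set.add d.keys := by
  induction ws with
  | nil => intro d; rfl
  | cons w ws ih =>
    intro d
    simp only [List.foldl_cons]
    rw [ih, pvKeys_ghostStep]

lemma pvKeys_ghost (id_list : List String) :
    ∀ (n : Int) (d : PySem.Dict String (PySem.Set Int)),
      (ghostFold (PySem.List.enumerate id_list n) d).keys =
        (id_list.map pySplitSpace).flatten.foldl PySem.Set.add d.keys := by
  induction id_list with
  | nil => intro n d; rfl
  | cons s rest ih =>
    intro n d
    rw [PySem.List.enumerate_cons]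
    unfold ghostFold
    simp only [List.foldl_cons, List.map_cons, List.flatten_cons, List.foldl_append]
    rw [show (PySem.List.enumerate rest (n + 1)).foldl
        (fun d p => (pySplitSpace p.2).foldl (fun d user => ghostStep d p.1 user) d)
        ((pySplitSpace s).foldl (fun d u => ghostStep d n u) d) =
      ghostFold (PySem.List.enumerate rest (n + 1))
        ((pySplitSpace s).foldl (fun d u => ghostStep d n u) d) from rfl]
    rw [ih, pvKeys_inner]

lemma pvSetAdd_idem {α : Type} [BEq α] [LawfulBEq α] (s : PySem.Set α) (x : α) :
    PySem.Set.add (PySem.Set.add s x) x = PySem.Set.add s x := by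
  by_cases h : x ∈ s
  · simp [PySem.Set.add, PySem.Set.contains, h]
  · simp [PySem.Set.add, PySem.Set.contains, h]

-- ghost values within one line: the day is added once iff the user occurs in the line
lemma pvGetD_inner (ws : List String) (t : Int) (u : String) :
    ∀ d : PySem.Dict String (PySem.Set Int),
      (ws.foldl (fun d u' => ghostStep d t u') d).getD u [] =
        if u ∈ ws then PySem.Set.add (d.getD u []) t else d.getD u [] := by
  induction ws with
  | nil => intro d; simp
  | cons w ws ih =>
    intro d
    simp only [List.foldl_cons]
    rw [ih]
    have hstep : (ghostStep d t w).getD u [] =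
        if u = w then PySem.Set.add (d.getD w []) t else d.getD u [] := by
      unfold ghostStep; rw [PySem.Dict.getD_modify]
    by_cases he : u = w
    · subst he
      rw [hstep, if_pos rfl]
      by_cases hm : u ∈ ws
      · rw [if_pos hm, if_pos (by simp), pvSetAdd_idem]
      · rw [if_neg hm, if_pos (by simp)]
    · rw [hstep, if_neg he]
      by_cases hm : u ∈ ws
      · rw [if_pos hm, if_pos (by simp [hm])]
      · rw [if_neg hm, if_neg (by simp [he, hm])]

lemma pvSetAdd_fresh (s : PySem.Set Int) (x : Int) (h : x ∉ s) :
    PySem.Set.add s x = s ++ [x] := by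
  simp [PySem.Set.add, PySem.Set.contains, h]

-- ghost values over the whole fold: the ordered list of days on which the user occurs
lemma pvGetD_ghost (id_list : List String) (u : String) :
    ∀ (n : Int) (d : PySem.Dict String (PySem.Set Int)),
      (∀ x ∈ d.getD u [], x < n) →
      (ghostFold (PySem.List.enumerate id_list n) d).getD u [] =
        d.getD u [] ++
          ((PySem.List.enumerate id_list n).filter
            (fun p => decide (u ∈ pySplitSpace p.2))).map (·.1) := by
  induction id_list with
  | nil => intro n d _; simp [ghostFold, PySem.List.enumerate]
  | cons s rest ih =>
    intro n d hbound
    rw [PySem.List.enumerate_cons]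
    unfold ghostFold
    simp only [List.foldl_cons, List.filter_cons]
    rw [show (PySem.List.enumerate rest (n + 1)).foldl
        (fun d p => (pySplitSpace p.2).foldl (fun d user => ghostStep d p.1 user) d)
        ((pySplitSpace s).foldl (fun d u' => ghostStep d n u') d) =
      ghostFold (PySem.List.enumerate rest (n + 1))
        ((pySplitSpace s).foldl (fun d u' => ghostStep d n u') d) from rfl]
    by_cases hm : u ∈ pySplitSpace s
    · have hfresh : n ∉ d.getD u [] := fun hx => absurd (hbound n hx) (by omega)
      have hget : ((pySplitSpace s).foldl (fun d u' => ghostStep d n u') d).getD u [] =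
          d.getD u [] ++ [n] := by
        rw [pvGetD_inner, if_pos hm, pvSetAdd_fresh _ _ hfresh]
      have hbound' : ∀ x ∈ ((pySplitSpace s).foldl (fun d u' => ghostStep d n u') d).getD u [],
          x < n + 1 := by
        rw [hget]
        intro x hx
        rcases List.mem_append.1 hx with h | h
        · exact lt_trans (hbound x h) (by omega)
        · simp at h; omega
      rw [ih (n + 1) _ hbound', hget]
      simp [hm, List.append_assoc]
    · have hget : ((pySplitSpace s).foldl (fun d u' => ghostStep d n u') d).getD u [] =
          d.getD u [] := by
        rw [pvGetD_inner, if_neg hm]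
      have hbound' : ∀ x ∈ ((pySplitSpace s).foldl (fun d u' => ghostStep d n u') d).getD u [],
          x < n + 1 := by
        rw [hget]
        intro x hx
        exact lt_trans (hbound x hx) (by omega)
      rw [ih (n + 1) _ hbound', hget]
      simp [hm]

-- counting occurrence days = counting the lines containing the user
lemma pvCount_enum (u : String) (id_list : List String) :
    ∀ n : Int,
      (((PySem.List.enumerate id_list n).filter
        (fun p => decide (u ∈ pySplitSpace p.2))).map (·.1)).length =
      (id_list.map pySplitSpace).countP (fun line => decide (u ∈ line)) := by
  induction id_list with
  | nil => intro n; simp [PySem.List.enumerate]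
  | cons s rest ih =>
    intro n
    rw [PySem.List.enumerate_cons]
    simp only [List.filter_cons, List.map_cons, List.countP_cons]
    by_cases hm : u ∈ pySplitSpace s
    · simp [hm, ih (n + 1)]
    · simp [hm, ih (n + 1)]

-- master characterisation of A: per user, min(number of lines containing it, max k 1)
lemma pvA_master (id_list : List String) (k : Int) :
    solution id_list k =
      ((PySem.Set.ofList (id_list.map pySplitSpace).flatten).map
        (fun u => min ((id_list.map pySplitSpace).countP (fun line => decide (u ∈ line)) : Int)
          (max k 1))).sum := by
  rw [pvA_eq_ghost]
  have hkeys : (ghostFold (PySem.List.enumerate id_list 0) PySem.Dict.empty).keys =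
      PySem.Set.ofList (id_list.map pySplitSpace).flatten := by
    rw [pvKeys_ghost, PySem.Set.ofList_eq_foldl]
    simp [PySem.Dict.keys_empty]
  have hnd : (ghostFold (PySem.List.enumerate id_list 0) PySem.Dict.empty).keys.Nodup := by
    rw [hkeys]; exact PySem.Set.nodup_ofList _
  rw [PySem.Dict.values_eq_map_keys _ hnd [], List.map_map, hkeys]
  refine congrArg List.sum (List.map_congr_left ?_)
  intro u _
  simp only [Function.comp]
  rw [pvGetD_ghost id_list u 0 PySem.Dict.empty (by simp [PySem.Dict.getD_empty]),
    PySem.Dict.getD_empty]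
  rw [List.nil_append, pvCount_enum]

-- B unfolded to the same shape (with cap k instead of max k 1)
lemma pvB_master (id_list : List String) (k : Int) :
    solution_alt id_list k =
      ((PySem.Set.ofList (id_list.map pySplitSpace).flatten).map
        (fun u => min ((id_list.map pySplitSpace).countP (fun line => decide (u ∈ line)) : Int)
          k)).sum := rfl

-- each user in the deduped list occurs in at least one line
lemma pvCount_pos (id_list : List String) (u : String)
    (hu : u ∈ PySem.Set.ofList (id_list.map pySplitSpace).flatten) :
    0 < (id_list.map pySplitSpace).countP (fun line => decide (u ∈ line)) := by
  rw [PySem.Set.mem_ofList, List.mem_flatten] at hu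
  obtain ⟨line, hline, humem⟩ := hu
  exact List.countP_pos_iff.2 ⟨line, hline, by simpa⟩

-- splitOn's worker never returns an empty list of pieces
lemma pvGo_ne_nil (sep : List Char) :
    ∀ (fuel : Nat) (l cur : List Char) (acc : List (List Char)),
      PySem.Chars.splitOn.go sep fuel l cur acc ≠ [] := by
  intro fuel
  induction fuel with
  | zero => intro l cur acc; simp [PySem.Chars.splitOn.go]
  | succ n ih =>
    intro l cur acc
    cases l with
    | nil => simp [PySem.Chars.splitOn.go]
    | cons c rest =>
      rw [show PySem.Chars.splitOn.go sep (n + 1) (c :: rest) cur acc =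
        (if sep.isPrefixOf (c :: rest) then
          PySem.Chars.splitOn.go sep n (List.drop sep.length (c :: rest)) [] (cur.reverse :: acc)
        else PySem.Chars.splitOn.go sep n rest (c :: cur) acc) from rfl]
      split
      · exact ih _ _ _
      · exact ih _ _ _

-- "x y z".split(" ") is never the empty list of pieces
lemma pvSplit_ne_nil (s : String) : pySplitSpace s ≠ [] := by
  unfold pySplitSpace PySem.Str.split? PySem.Chars.split?
  have hsep : (" " : String).toList = [' '] := rfl
  rw [hsep]
  simp only [List.isEmpty_cons, if_false, Option.map_some, Option.getD_some, Bool.false_eq_true]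
  intro h
  rw [List.map_eq_nil_iff] at h
  exact pvGo_ne_nil [' '] _ _ _ _ (by simpa [PySem.Chars.splitOn] using h)

-- ===== VERDICT (by name: the statements are the Claim_ definitions above) =====
theorem solution_spec : Claim_unchanged_solution := by
  intro id_list k _ hpre hnd
  unfold Pre_solution at hpre
  unfold D_solution at hnd
  rw [pvA_master, pvB_master]
  by_cases hL : id_list = []
  · subst hL; rfl
  · have hk1 : 1 ≤ k := by
      rcases lt_or_ge k 1 with h | h
      · exact absurd ⟨by omega, hL⟩ hnd
      · exact h
    refine congrArg List.sum (List.map_congr_left ?_)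
    intro u _
    rw [max_eq_left hk1]

theorem solution_changed : Claim_changed_solution := by
  unfold Claim_changed_solution; decide

theorem solution_tight : Claim_exact_solution := by
  intro id_list k _ _ hd
  obtain ⟨hk, hL⟩ := hd
  subst hk
  rw [pvA_master, pvB_master]
  have hones : List.map
      (fun u => min ((id_list.map pySplitSpace).countP (fun line => decide (u ∈ line)) : Int)
        (max 0 1)) (PySem.Set.ofList (id_list.map pySplitSpace).flatten) =
      List.map (fun _ => (1 : Int)) (PySem.Set.ofList (id_list.map pySplitSpace).flatten) :=
    List.map_congr_left (fun u hu => by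
      have h1 : (1 : Int) ≤ ((id_list.map pySplitSpace).countP (fun line => decide (u ∈ line)) : Int) := by
        exact_mod_cast pvCount_pos id_list u hu
      omega)
  have hzeros : List.map
      (fun u => min ((id_list.map pySplitSpace).countP (fun line => decide (u ∈ line)) : Int)
        (0 : Int)) (PySem.Set.ofList (id_list.map pySplitSpace).flatten) =
      List.map (fun _ => (0 : Int)) (PySem.Set.ofList (id_list.map pySplitSpace).flatten) :=
    List.map_congr_left (fun u _ => by
      have h0 : (0 : Int) ≤ ((id_list.map pySplitSpace).countP (fun line => decide (u ∈ line)) : Int) := by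
        positivity
      omega)
  rw [hones, hzeros]
  have hflat : (id_list.map pySplitSpace).flatten ≠ [] := by
    cases id_list with
    | nil => exact absurd rfl hL
    | cons s rest =>
      simp only [List.map_cons, List.flatten_cons]
      exact List.append_ne_nil_of_left_ne_nil (pvSplit_ne_nil s) _
  have hne : PySem.Set.ofList (id_list.map pySplitSpace).flatten ≠ [] := by
    obtain ⟨x, hx⟩ := List.exists_mem_of_ne_nil _ hflat
    intro h
    have hx' := (PySem.Set.mem_ofList _ x).2 hx
    rw [h] at hx'
    simp at hx'
  have hpos : 0 < (PySem.Set.ofList (id_list.map pySplitSpace).flatten).length :=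
    List.length_pos_of_ne_nil hne
  simp only [List.map_const', List.sum_replicate, nsmul_eq_mul, mul_one, mul_zero]
  omega
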